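-- pv_equiv track=rewrite | github.com/jemtca/CodingBat | Python/String-3/count_yz.py | count_yz
-- ===== SOURCE A (Python) =====
-- def count_yz(str):
--     count = 0
--
--     for x in range(len(str)):
--         if x < len(str)-1:
--             if (str[x].lower() == 'y' and not str[x+1].isalpha() ) or (str[x].lower() == 'z' and not str[x+1].isalpha()):
--                 count += 1
--         else:
--             if str[x].lower() == 'y' or str[x].lower() == 'z':
--                 count += 1
--
--     return count
-- ===== SOURCE B (Python) =====
-- def count_yz(str):
--     count = 0
--     last = None  # last letter of the current alphabetic run, None when outside a run
--     for c in str: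
--         if c.isalpha():
--             last = c
--         else:
--             if last is not None and last.lower() in ('y', 'z'):
--                 count += 1
--             last = None
--     if last is not None and last.lower() in ('y', 'z'):
--         count += 1
--     return count
-- ===== Notes on version B (the rewrite author's own statement) =====
-- stated objective: alternative
-- what changed: Replaced A's indexed scan with per-position lookahead (str[x], str[x+1]) by a single state-machine pass over the characters that tracks the last letter of the current alphabetic run and counts runs ending in y/z.
import Mathlib
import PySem

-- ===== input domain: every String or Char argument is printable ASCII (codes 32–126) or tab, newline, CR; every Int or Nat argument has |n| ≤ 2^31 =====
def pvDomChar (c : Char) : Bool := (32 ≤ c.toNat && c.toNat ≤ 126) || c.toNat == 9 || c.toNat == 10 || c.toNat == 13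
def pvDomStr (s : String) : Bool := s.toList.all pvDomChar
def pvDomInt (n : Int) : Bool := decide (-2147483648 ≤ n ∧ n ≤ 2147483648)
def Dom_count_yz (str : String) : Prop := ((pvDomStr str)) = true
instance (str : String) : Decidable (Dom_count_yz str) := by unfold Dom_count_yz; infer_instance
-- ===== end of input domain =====

-- B replaces A's indexed lookahead scan with a single state-machine pass that tracks the
-- last letter of the current alphabetic run and counts runs ending in y/z (objective: alternative decomposition).

-- ===== PORT A =====
def count_yz (str : String) : Int :=
  (PySem.List.pyRange 0 (str.toList.length : Int) 1).foldl (fun count x =>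
    if x < (str.toList.length : Int) - 1 then
      if (PySem.Chars.lowerChar (PySem.List.pyGetD str.toList x ' ') == 'y'
            && !(PySem.Chars.isalpha (PySem.List.pyGetD str.toList (x+1) ' ')))
         || (PySem.Chars.lowerChar (PySem.List.pyGetD str.toList x ' ') == 'z'
            && !(PySem.Chars.isalpha (PySem.List.pyGetD str.toList (x+1) ' '))) then
        count + 1
      else count
    else
      if PySem.Chars.lowerChar (PySem.List.pyGetD str.toList x ' ') == 'y'
         || PySem.Chars.lowerChar (PySem.List.pyGetD str.toList x ' ') == 'z' then
        count + 1
      else count) 0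

-- ===== PORT B =====
-- "last is not None and last.lower() in ('y', 'z')"
def pvLastYZ : Option Char → Bool
  | some c => PySem.Chars.lowerChar c == 'y' || PySem.Chars.lowerChar c == 'z'
  | none => false

def count_yz_alt (str : String) : Int :=
  let r := str.toList.foldl (fun (st : Int × Option Char) c =>
      if PySem.Chars.isalpha c then (st.1, some c)
      else (if pvLastYZ st.2 then st.1 + 1 else st.1, none)) ((0 : Int), (none : Option Char))
  if pvLastYZ r.2 then r.1 + 1 else r.1

-- ===== PRECONDITION & SPEC =====
def Spec_count_yz (str : String) (out : Int) : Prop := out = count_yz_alt str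
instance (str : String) (out : Int) : Decidable (Spec_count_yz str out) := by unfold Spec_count_yz; infer_instance

-- ===== CLAIM (what is proved, stated in full; the proofs are below) =====
def Claim_equal_count_yz : Prop := ∀ (str : String), Dom_count_yz str → Spec_count_yz str (count_yz str)

-- ===== LEMMAS AND PROOFS =====

/-- `lower c ∈ {y,z}` as a Bool. -/
def pvYZ (c : Char) : Bool :=
  PySem.Chars.lowerChar c == 'y' || PySem.Chars.lowerChar c == 'z'

/-- Common specification: count positions holding a y/z whose successor (if any) is not a letter. -/
def pvSpec : List Char → Int
  | [] => 0
  | [c] => if pvYZ c then 1 else 0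
  | a :: b :: t => (if pvYZ a && !PySem.Chars.isalpha b then 1 else 0) + pvSpec (b :: t)

lemma pvYZ_of_not_alpha {c : Char} (h : PySem.Chars.isalpha c = false) : pvYZ c = false := by
  rw [PySem.Chars.isalpha, Bool.or_eq_false_iff] at h
  obtain ⟨hu, hl⟩ := h
  have hlc : PySem.Chars.lowerChar c = c := by simp [PySem.Chars.lowerChar, hu]
  simp only [pvYZ, hlc]
  by_cases hy : c = 'y'
  · subst hy; exact absurd hl (by decide)
  by_cases hz : c = 'z'
  · subst hz; exact absurd hl (by decide)
  simp [hy, hz]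

/-- The body of A's loop, abstracted over the list. -/
def pvABody (cs : List Char) (count : Int) (x : Int) : Int :=
  if x < (cs.length : Int) - 1 then
    if (PySem.Chars.lowerChar (PySem.List.pyGetD cs x ' ') == 'y'
          && !(PySem.Chars.isalpha (PySem.List.pyGetD cs (x+1) ' ')))
       || (PySem.Chars.lowerChar (PySem.List.pyGetD cs x ' ') == 'z'
          && !(PySem.Chars.isalpha (PySem.List.pyGetD cs (x+1) ' '))) then
      count + 1
    else count
  else
    if PySem.Chars.lowerChar (PySem.List.pyGetD cs x ' ') == 'y'
       || PySem.Chars.lowerChar (PySem.List.pyGetD cs x ' ') == 'z' then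
      count + 1
    else count

lemma pvABody_shift (c : Char) (cs : List Char) (k : Nat) (acc : Int) :
    pvABody (c :: cs) acc ((k : Int) + 1) = pvABody cs acc k := by
  have h1 : ((k : Int) + 1) = ((k + 1 : Nat) : Int) := by push_cast; ring
  have h2 : (((k + 1 : Nat) : Int) + 1) = ((k + 2 : Nat) : Int) := by push_cast; ring
  have h3 : (((k + 1 : Nat) : Int) < ((cs.length + 1 : Nat) : Int) - 1) ↔
      ((k : Int) < (cs.length : Int) - 1) := by push_cast; omega
  simp only [pvABody, h1, h2, PySem.List.pyGetD_natCast, List.getD_cons_succ,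
    List.length_cons]
  rw [if_congr h3 rfl rfl]

lemma pvA_fold (cs : List Char) : ∀ count : Int,
    (List.range cs.length).foldl (fun acc (k : Nat) => pvABody cs acc k) count
      = count + pvSpec cs := by
  induction cs with
  | nil => intro count; simp [pvSpec]
  | cons c cs ih =>
    intro count
    rw [List.length_cons, List.range_succ_eq_map, List.foldl_cons, List.foldl_map]
    rw [PySem.List.foldl_congr_mem _ _ (fun acc (k : Nat) => pvABody cs acc k) _
      (by
        intro acc k _
        have : ((k + 1 : Nat) : Int) = (k : Int) + 1 := by push_cast; ring
        rw [this, pvABody_shift])]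
    rw [ih]
    have hhead : pvABody (c :: cs) count 0 + pvSpec cs = count + pvSpec (c :: cs) := by
      cases cs with
      | nil =>
        simp only [pvABody, pvSpec, pvYZ, PySem.List.pyGetD_zero_cons, List.length_cons,
          List.length_nil]
        norm_num
        by_cases h : PySem.Chars.lowerChar c = 'y' ∨ PySem.Chars.lowerChar c = 'z' <;>
          simp [h]
      | cons b t =>
        have h0 : (0 : Int) < ((c :: b :: t).length : Int) - 1 := by
          simp
        have hget1 : PySem.List.pyGetD (c :: b :: t) ((0 : Int) + 1) ' ' = b := by
          simp [PySem.List.pyGetD]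
        simp only [pvABody, if_pos h0, PySem.List.pyGetD_zero_cons, hget1, pvSpec, pvYZ]
        rw [← Bool.and_or_distrib_right]
        split <;> omega
    omega

lemma pvA_eq_spec (str : String) : count_yz str = pvSpec str.toList := by
  unfold count_yz
  rw [PySem.List.pyRange_one]
  simp only [sub_zero, Int.toNat_natCast, List.foldl_map, zero_add]
  have := pvA_fold str.toList 0
  simpa [pvABody] using this

/-- Is the next character (if any) a non-letter? -/
def pvHeadNA : List Char → Bool
  | [] => true
  | c :: _ => !PySem.Chars.isalpha c

/-- B's remaining count, given the pending last letter of the current run. -/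
def pvF (last : Option Char) : List Char → Int
  | [] => if pvLastYZ last then 1 else 0
  | c :: cs =>
    if PySem.Chars.isalpha c then pvF (some c) cs
    else (if pvLastYZ last then 1 else 0) + pvF none cs

lemma pvF_eq_spec : ∀ (cs : List Char) (last : Option Char),
    pvF last cs = (if pvLastYZ last && pvHeadNA cs then 1 else 0) + pvSpec cs := by
  intro cs
  induction cs with
  | nil => intro last; simp [pvF, pvHeadNA, pvSpec]
  | cons c t ih =>
    intro last
    by_cases hc : PySem.Chars.isalpha c = true
    · have hspec : pvSpec (c :: t) = (if pvYZ c && pvHeadNA t then 1 else 0) + pvSpec t := by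
        cases t with
        | nil => simp [pvSpec, pvHeadNA]
        | cons b u => simp [pvSpec, pvHeadNA]
      rw [show pvF last (c :: t) = pvF (some c) t from by simp [pvF, hc]]
      rw [ih (some c), hspec]
      have h1 : pvHeadNA (c :: t) = false := by simp [pvHeadNA, hc]
      have h2 : pvLastYZ (some c) = pvYZ c := rfl
      rw [h1, h2]
      simp
    · have hc' : PySem.Chars.isalpha c = false := by simpa using hc
      have hyz : pvYZ c = false := pvYZ_of_not_alpha hc'
      have hspec : pvSpec (c :: t) = pvSpec t := by
        cases t with
        | nil => simp [pvSpec, hyz]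
        | cons b u => simp [pvSpec, hyz]
      rw [show pvF last (c :: t) = (if pvLastYZ last then 1 else 0) + pvF none t from by
        simp [pvF, hc']]
      rw [ih none, hspec]
      have h1 : pvHeadNA (c :: t) = true := by simp [pvHeadNA, hc']
      rw [h1]
      simp [pvLastYZ]

lemma pvB_fold : ∀ (cs : List Char) (count : Int) (last : Option Char),
    (let r := cs.foldl (fun (st : Int × Option Char) c =>
        if PySem.Chars.isalpha c then (st.1, some c)
        else (if pvLastYZ st.2 then st.1 + 1 else st.1, none)) (count, last)
     if pvLastYZ r.2 then r.1 + 1 else r.1) = count + pvF last cs := by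
  intro cs
  induction cs with
  | nil =>
    intro count last
    simp only [List.foldl_nil, pvF]
    split <;> omega
  | cons c t ih =>
    intro count last
    by_cases hc : PySem.Chars.isalpha c = true
    · simp only [List.foldl_cons, hc, if_pos, pvF, ih]
    · have hc' : PySem.Chars.isalpha c = false := by simpa using hc
      simp only [List.foldl_cons, hc', Bool.false_eq_true, if_false, pvF, ih]
      split <;> omega

lemma pvB_eq_spec (str : String) : count_yz_alt str = pvSpec str.toList := by
  unfold count_yz_alt
  rw [pvB_fold str.toList 0 none]
  rw [pvF_eq_spec str.toList none]
  simp [pvLastYZ]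

-- ===== VERDICT (by name: the statement is the Claim_ definition above) =====
theorem count_yz_spec : Claim_equal_count_yz := by
  intro str _
  unfold Spec_count_yz
  rw [pvA_eq_spec, pvB_eq_spec]
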